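-- pv_equiv track=rewrite | github.com/huangyuzhen/let | 36/36.py | isValidLine
-- ===== SOURCE A (Python) =====
-- def isValidLine(line):
--     s = set()
--     for one in line:
--         if one != ".":
--             if one in s:
--                 return False
--             s.add(one)
--
--     return True
-- ===== SOURCE B (Python) =====
-- def isValidLine(line):
--     filtered = sorted(x for x in line if x != ".")
--     return all(a != b for a, b in zip(filtered, filtered[1:]))
-- ===== Notes on version B (the rewrite author's own statement) =====
-- stated objective: alternative
-- what changed: Replaces A's streaming set-membership test with early exit by a sort-based duplicate check: sort the non-dot entries and verify no two adjacent sorted entries are equal, using no set at all.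
import Mathlib
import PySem

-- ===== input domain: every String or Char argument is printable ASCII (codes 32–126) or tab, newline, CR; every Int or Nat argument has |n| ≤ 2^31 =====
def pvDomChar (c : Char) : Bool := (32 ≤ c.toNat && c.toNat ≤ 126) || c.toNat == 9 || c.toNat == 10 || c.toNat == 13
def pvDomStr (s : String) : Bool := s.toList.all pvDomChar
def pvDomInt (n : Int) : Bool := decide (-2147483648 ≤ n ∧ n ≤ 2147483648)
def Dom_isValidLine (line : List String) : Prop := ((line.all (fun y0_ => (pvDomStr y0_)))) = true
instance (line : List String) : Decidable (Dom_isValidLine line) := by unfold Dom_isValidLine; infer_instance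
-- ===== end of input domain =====

-- B replaces A's streaming set-membership loop by a sort-based duplicate check (objective: alternative).

-- ===== PORT A =====
-- the 'for one in line' loop with its early 'return False' and the growing set s
def isValidLineLoop (line : List String) (s : PySem.Set String) : Bool :=
  match line with
  | [] => true
  | one :: rest =>
    if one ≠ "." then
      if PySem.Set.contains s one then false
      else isValidLineLoop rest (PySem.Set.add s one)
    else isValidLineLoop rest s

def isValidLine (line : List String) : Bool :=
  isValidLineLoop line PySem.Set.empty

-- ===== PORT B =====
-- filtered = sorted(x for x in line if x != "."); all adjacent pairs distinct
def isValidLine_alt (line : List String) : Bool :=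
  let filtered := PySem.List.sorted (line.filter (fun x => x != ".")) (fun x => x) false
  (filtered.zip (filtered.drop 1)).all (fun p => p.1 != p.2)

-- ===== PRECONDITION & SPEC =====
def Spec_isValidLine (line : List String) (out : Bool) : Prop := out = isValidLine_alt line
instance (line : List String) (out : Bool) : Decidable (Spec_isValidLine line out) := by unfold Spec_isValidLine; infer_instance

-- ===== CLAIM (what is proved, stated in full; the proofs are below) =====
def Claim_equal_isValidLine : Prop := ∀ (line : List String), Dom_isValidLine line → Spec_isValidLine line (isValidLine line)

-- ===== LEMMAS AND PROOFS =====

-- A's loop succeeds iff the non-dot entries are pairwise distinct and none already lies in s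
theorem isValidLineLoop_true_iff (line : List String) (s : List String) :
    isValidLineLoop line s = true ↔
      (line.filter (fun x => x != ".")).Nodup ∧ ∀ x ∈ line.filter (fun x => x != "."), x ∉ s := by
  induction line generalizing s with
  | nil => simp [isValidLineLoop]
  | cons one rest ih =>
    by_cases hdot : one = "."
    · subst hdot
      simp [isValidLineLoop, ih]
    · have hf : (one :: rest).filter (fun x => x != ".") =
          one :: rest.filter (fun x => x != ".") := by
        simp [hdot]
      by_cases hmem : one ∈ s
      · simp only [isValidLineLoop, hdot, ite_not]
        rw [hf]
        simp [hmem, hdot]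
      · simp only [isValidLineLoop]
        rw [if_pos hdot, if_neg (by simp [hmem]), ih, hf,
          PySem.Set.add_of_not_mem hmem]
        constructor
        · rintro ⟨hnd, hall⟩
          have hone : one ∉ rest.filter (fun x => x != ".") := by
            intro hx
            have := hall one hx
            simp at this
          refine ⟨List.nodup_cons.mpr ⟨hone, hnd⟩, ?_⟩
          intro x hx
          rcases List.mem_cons.mp hx with h | h
          · subst h; exact hmem
          · intro hxs
            exact (hall x h) (by simp [hxs])
        · rintro ⟨hnd, hall⟩
          rcases List.nodup_cons.mp hnd with ⟨hone, hnd'⟩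
          refine ⟨hnd', ?_⟩
          intro x hx hxs
          rcases List.mem_append.mp hxs with h | h
          · exact hall x (List.mem_cons_of_mem _ hx) h
          · simp at h; subst h; exact hone hx

-- the adjacent-pairs scan is exactly Chain' (· ≠ ·)
theorem zip_all_ne_iff_isChain (ys : List String) :
    ((ys.zip (ys.drop 1)).all (fun p => p.1 != p.2)) = true ↔ List.IsChain (· ≠ ·) ys := by
  induction ys with
  | nil => simp
  | cons x tail ih =>
    cases tail with
    | nil => simp
    | cons y rest =>
      rw [List.isChain_cons_cons]
      simp only [List.drop_succ_cons, List.drop_zero, List.zip_cons_cons, List.all_cons,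
        Bool.and_eq_true, bne_iff_ne, ne_eq]
      rw [← ih]
      simp

-- on a (weakly) sorted list, adjacent-distinct is the same as no duplicates at all
theorem isChain_ne_iff_nodup_of_sorted (ys : List String)
    (hs : ys.Pairwise (· ≤ ·)) : List.IsChain (· ≠ ·) ys ↔ ys.Nodup := by
  constructor
  · intro hc
    have hle : List.IsChain (· ≤ ·) ys := hs.isChain
    have hlt : List.IsChain (· < ·) ys := by
      induction ys with
      | nil => exact List.isChain_nil
      | cons x tail ih =>
        cases tail with
        | nil => simp
        | cons y rest =>
          rw [List.isChain_cons_cons] at hc hle ⊢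
          refine ⟨lt_of_le_of_ne hle.1 hc.1, ?_⟩
          exact ih (List.Pairwise.sublist (List.sublist_cons_self _ _) hs) hc.2 hle.2
    have : ys.Pairwise (· < ·) := (List.isChain_iff_pairwise).mp hlt
    exact this.imp ne_of_lt
  · intro hnd
    exact hnd.isChain

-- ===== VERDICT (by name: the statement is the Claim_ definition above) =====
theorem isValidLine_spec : Claim_equal_isValidLine := by
  intro line _
  unfold Spec_isValidLine isValidLine isValidLine_alt
  rw [Bool.eq_iff_iff, isValidLineLoop_true_iff]
  set f := line.filter (fun x => x != ".") with hf
  have hperm : (PySem.List.sorted f (fun x => x) false).Perm f := PySem.List.sorted_perm _ _ _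
  rw [zip_all_ne_iff_isChain,
    isChain_ne_iff_nodup_of_sorted _ (PySem.List.sorted_pairwise f (fun x => x))]
  constructor
  · rintro ⟨h, _⟩; exact (hperm.nodup_iff).mpr h
  · intro h
    exact ⟨(hperm.nodup_iff).mp h, by intro x _ hx; simp [PySem.Set.empty] at hx⟩
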